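-- pv_equiv track=rewrite | github.com/miliar/Code_Jam_Webscraper | solutions_python/Problem_200/2795.py | check
-- ===== SOURCE A (Python) =====
-- def check(n):
--     temp = str(n)[::-1]
--     last = temp[0]
--     for i in temp[1:]:
--         if i > last:
--             return False
--         else:
--             last = i
--     return True
-- ===== SOURCE B (Python) =====
-- def check(n):
--     s = str(n)
--     return list(s) == sorted(s)
-- ===== Notes on version B (the rewrite author's own statement) =====
-- stated objective: simpler
-- what changed: Replaces the reverse-then-scan loop with a one-liner that checks str(n) equals its sorted form (a string is non-decreasing iff it equals sorted(itself)).
import Mathlib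
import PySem

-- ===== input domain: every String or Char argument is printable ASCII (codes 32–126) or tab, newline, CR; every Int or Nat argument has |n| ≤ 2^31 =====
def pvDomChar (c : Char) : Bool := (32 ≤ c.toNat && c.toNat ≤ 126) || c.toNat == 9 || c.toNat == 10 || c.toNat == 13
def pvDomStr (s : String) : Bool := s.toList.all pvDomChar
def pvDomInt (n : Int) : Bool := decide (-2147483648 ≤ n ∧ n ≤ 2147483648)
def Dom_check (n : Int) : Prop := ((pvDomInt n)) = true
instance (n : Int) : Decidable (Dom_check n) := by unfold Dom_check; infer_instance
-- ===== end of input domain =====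

-- B changes the strategy: instead of reversing str(n) and scanning adjacent pairs, it
-- compares str(n) with its sorted form (objective: simpler).

-- ===== PORT A =====
-- the for-loop over temp[1:] with accumulator `last`
def checkLoop : Char → List Char → Bool
  | _, [] => true
  | last, i :: rest => if last < i then false else checkLoop i rest

def check (n : Int) : Bool :=
  -- temp = str(n)[::-1]  (s[::-1] is reverse, PySem.Str.slice?_none_none_neg_one)
  match (PySem.Int.toStr n).toList.reverse with
  | [] => true          -- unreachable: str(n) is never empty (temp[0] would raise)
  | last :: rest => checkLoop last rest   -- last = temp[0]; loop over temp[1:]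

-- ===== PORT B =====
def check_alt (n : Int) : Bool :=
  let s := (PySem.Int.toStr n).toList
  decide (s = PySem.List.sorted s (fun c => c) false)

-- ===== PRECONDITION & SPEC =====
def Spec_check (n : Int) (out : Bool) : Prop := out = check_alt n
instance (n : Int) (out : Bool) : Decidable (Spec_check n out) := by unfold Spec_check; infer_instance

-- ===== CLAIM (what is proved, stated in full; the proofs are below) =====
def Claim_equal_check : Prop := ∀ (n : Int), Dom_check n → Spec_check n (check n)

-- ===== LEMMAS AND PROOFS =====
lemma checkLoop_iff (l : List Char) (a : Char) :
    checkLoop a l = true ↔ List.IsChain (fun x y => y ≤ x) (a :: l) := by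
  induction l generalizing a with
  | nil => simp [checkLoop]
  | cons b t ih =>
    rw [List.isChain_cons_cons]
    by_cases h : a < b
    · simp [checkLoop, h, not_le.mpr h]
    · simp [checkLoop, h, ih, not_lt.mp h]

lemma check_iff_chain (n : Int) :
    check n = true ↔ List.IsChain (· ≤ ·) (PySem.Int.toStr n).toList := by
  unfold check
  cases hrev : (PySem.Int.toStr n).toList.reverse with
  | nil =>
    have h0 : (PySem.Int.toStr n).toList = [] := by
      simpa using congrArg List.reverse hrev
    simp [h0]
  | cons a t =>
    rw [checkLoop_iff, ← hrev, List.isChain_reverse]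

lemma sorted_eq_iff_pairwise (s : List Char) :
    s = PySem.List.sorted s (fun c => c) false ↔ s.Pairwise (· ≤ ·) := by
  constructor
  · intro h
    have hp := PySem.List.sorted_pairwise (xs := s) (key := fun c => c)
    rw [← h] at hp
    exact hp
  · intro h
    exact (PySem.List.sorted_eq_self_of_pairwise s (fun c => c) h).symm

-- ===== VERDICT (by name: the statement is the Claim_ definition above) =====
theorem check_spec : Claim_equal_check := by
  intro n _
  unfold Spec_check
  have hb : check_alt n = true ↔ List.IsChain (· ≤ ·) (PySem.Int.toStr n).toList := by
    unfold check_alt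
    rw [decide_eq_true_iff, sorted_eq_iff_pairwise, ← List.isChain_iff_pairwise]
  have ha := check_iff_chain n
  by_cases h : List.IsChain (· ≤ ·) (PySem.Int.toStr n).toList
  · rw [ha.mpr h, hb.mpr h]
  · have h1 : check n = false := by
      cases hc : check n
      · rfl
      · exact absurd (ha.mp hc) h
    have h2 : check_alt n = false := by
      cases hc : check_alt n
      · rfl
      · exact absurd (hb.mp hc) h
    rw [h1, h2]
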